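-- pv_equiv track=rewrite | github.com/BaeLab/STRiker | analyze_func_pysam/analyze_func.py | simplify_pattern_dict
-- ===== SOURCE A (Python) =====
-- from collections import defaultdict
--
-- def simplify_pattern_dict(pattern_dict, motif_dict):
--     """
--     motif_dict에 없는 motif를 가진 tuple들을 하나로 합쳐서 pattern_dict를 단순화함.
--     plotly에서의 trace 수를 줄이기 위함.
--     """
--     simplified_pattern_dict = defaultdict(list)
--     for gene in pattern_dict.keys():
--         pattern_lists = pattern_dict[gene]
--         for i in range(len(pattern_lists)):
--             pattern_list = pattern_lists[i]
--             simplified_pattern_list = []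
--             simplified_pattern = []
--             for pattern, count in pattern_list:
--                 if pattern not in motif_dict.get(gene, {}):
--                     simplified_pattern.append(pattern * count)
--                 else:
--                     if simplified_pattern:
--                         simplified_pattern_list.append(("".join(simplified_pattern), 1))
--                         simplified_pattern = []
--                     # motif_dict에 있는 motif는 그대로 사용
--                     simplified_pattern_list.append((pattern, count))
--             if simplified_pattern:
--                 simplified_pattern_list.append(("".join(simplified_pattern), 1))
--                 simplified_pattern = []
--             simplified_pattern_dict[gene].append(simplified_pattern_list)
--     return simplified_pattern_dict
-- ===== SOURCE B (Python) =====
-- from collections import defaultdict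
--
--
-- def simplify_pattern_dict(pattern_dict, motif_dict):
--     """Staged decomposition: first locate the motif boundary indices of each
--     pattern_list, then build the output by slicing between consecutive
--     boundaries (each gap is joined into one ('...', 1) tuple)."""
--     result = defaultdict(list)
--     for gene, pattern_lists in pattern_dict.items():
--         motifs = set(motif_dict.get(gene, {}))
--         for pl in pattern_lists:
--             cuts = [i for i, (p, _c) in enumerate(pl) if p in motifs]
--             out = []
--             prev = 0
--             for i in cuts:
--                 if prev < i:
--                     out.append(("".join(p * c for p, c in pl[prev:i]), 1))
--                 p, c = pl[i]
--                 out.append((p, c))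
--                 prev = i + 1
--             if prev < len(pl):
--                 out.append(("".join(p * c for p, c in pl[prev:]), 1))
--             result[gene].append(out)
--     return result
-- ===== Notes on version B (the rewrite author's own statement) =====
-- stated objective: alternative
-- what changed: Replaces A's single stateful pass with a pending-fragment buffer by a staged index/slice decomposition: first compute the list of motif boundary indices of each pattern_list, then build the output by slicing between consecutive boundaries, joining each gap slice into one ('...', 1) tuple.
import Mathlib
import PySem

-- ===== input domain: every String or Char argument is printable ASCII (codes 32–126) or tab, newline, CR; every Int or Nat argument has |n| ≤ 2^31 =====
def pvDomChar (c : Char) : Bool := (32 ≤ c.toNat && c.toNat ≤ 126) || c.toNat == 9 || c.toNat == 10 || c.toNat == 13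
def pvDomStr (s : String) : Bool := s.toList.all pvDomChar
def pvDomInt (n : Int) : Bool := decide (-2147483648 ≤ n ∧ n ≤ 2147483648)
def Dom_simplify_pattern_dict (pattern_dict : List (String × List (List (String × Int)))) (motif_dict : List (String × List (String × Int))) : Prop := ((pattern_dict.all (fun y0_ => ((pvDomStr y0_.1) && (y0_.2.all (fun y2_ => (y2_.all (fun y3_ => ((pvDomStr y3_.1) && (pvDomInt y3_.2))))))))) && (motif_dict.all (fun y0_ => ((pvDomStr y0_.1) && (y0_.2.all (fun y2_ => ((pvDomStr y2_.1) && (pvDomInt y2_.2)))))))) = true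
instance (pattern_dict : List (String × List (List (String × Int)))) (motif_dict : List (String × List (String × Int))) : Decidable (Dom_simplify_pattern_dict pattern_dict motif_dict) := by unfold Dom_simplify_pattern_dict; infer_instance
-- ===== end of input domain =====

-- B replaces A's single stateful pass (pending-fragment buffer flushed at motif hits) by a
-- staged index/slice decomposition: compute the motif boundary indices first, then build the
-- output by slicing between consecutive boundaries; objective: alternative.

-- Python's 'pattern * count' on a string (negative count gives "")
def pvStrTimes (s : String) (n : Int) : String := String.ofList (PySem.List.pyRepeat s.toList n)

-- ===== PORT A =====
def simplify_pattern_dict (pattern_dict : List (String × List (List (String × Int)))) (motif_dict : List (String × List (String × Int))) : List (String × List (List (String × Int))) :=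
  let pdict : PySem.Dict String (List (List (String × Int))) := PySem.Dict.ofList pattern_dict
  let mdict : PySem.Dict String (List (String × Int)) := PySem.Dict.ofList motif_dict
  -- 'pattern not in motif_dict.get(gene, {})' is key-membership in the value dict,
  -- tested on its association list (exact: values are irrelevant for 'in')
  let res : PySem.Dict String (List (List (String × Int))) :=
    pdict.keys.foldl (fun (acc : PySem.Dict String (List (List (String × Int)))) (gene : String) =>
      (pdict.getD gene []).foldl (fun acc (pattern_list : List (String × Int)) =>
        let st := pattern_list.foldl (fun (st : List (String × Int) × List String) pc =>
          if !((mdict.getD gene []).any (fun q => q.1 == pc.1)) then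
            (st.1, st.2 ++ [pvStrTimes pc.1 pc.2])
          else
            ((if st.2 ≠ [] then st.1 ++ [(PySem.Str.join "" st.2, 1)] else st.1) ++ [(pc.1, pc.2)], []))
          (([], []) : List (String × Int) × List String)
        let spl := if st.2 ≠ [] then st.1 ++ [(PySem.Str.join "" st.2, 1)] else st.1
        acc.modify gene [] (· ++ [spl])) acc)
      PySem.Dict.empty
  res.items

-- ===== PORT B =====
-- staged: 'cuts' is the list of motif boundary indices of pl (enumerate + filter); the
-- output is built by folding over cuts, slicing pl between consecutive boundaries
def simplify_pattern_dict_alt (pattern_dict : List (String × List (List (String × Int)))) (motif_dict : List (String × List (String × Int))) : List (String × List (List (String × Int))) :=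
  let mdict : PySem.Dict String (List (String × Int)) := PySem.Dict.ofList motif_dict
  let res : PySem.Dict String (List (List (String × Int))) :=
    (PySem.Dict.ofList pattern_dict).items.foldl (fun acc item =>
      let motifs : PySem.Set String := PySem.Set.ofList ((mdict.getD item.1 []).map (·.1))
      item.2.foldl (fun acc pl =>
        let cuts := ((PySem.List.enumerate pl 0).filter (fun ip => PySem.Set.contains motifs ip.2.1)).map (·.1)
        let st := cuts.foldl (fun (st : List (String × Int) × Int) i =>
          ((if st.2 < i then
              st.1 ++ [(PySem.Str.join "" ((PySem.List.slice pl (some st.2) (some i)).map (fun pc => pvStrTimes pc.1 pc.2)), 1)]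
            else st.1)
            ++ [(PySem.List.pyGet? pl i).getD ("", 0)], i + 1))
          (([], 0) : List (String × Int) × Int)
        let out := if st.2 < (pl.length : Int) then
            st.1 ++ [(PySem.Str.join "" ((PySem.List.slice pl (some st.2) none).map (fun pc => pvStrTimes pc.1 pc.2)), 1)]
          else st.1
        acc.modify item.1 [] (· ++ [out])) acc)
      PySem.Dict.empty
  res.items

-- ===== PRECONDITION & SPEC =====
def Spec_simplify_pattern_dict (pattern_dict : List (String × List (List (String × Int)))) (motif_dict : List (String × List (String × Int))) (out : List (String × List (List (String × Int)))) : Prop := out = simplify_pattern_dict_alt pattern_dict motif_dict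
instance (pattern_dict : List (String × List (List (String × Int)))) (motif_dict : List (String × List (String × Int))) (out : List (String × List (List (String × Int)))) : Decidable (Spec_simplify_pattern_dict pattern_dict motif_dict out) := by unfold Spec_simplify_pattern_dict; infer_instance

-- ===== CLAIM (what is proved, stated in full; the proofs are below) =====
def Claim_equal_simplify_pattern_dict : Prop := ∀ (pattern_dict : List (String × List (List (String × Int)))) (motif_dict : List (String × List (String × Int))), Dom_simplify_pattern_dict pattern_dict motif_dict → Spec_simplify_pattern_dict pattern_dict motif_dict (simplify_pattern_dict pattern_dict motif_dict)

-- ===== LEMMAS AND PROOFS =====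

-- canonical merged form both programs compute per pattern_list: a motif element passes
-- through; a maximal non-motif run is joined into one ("…", 1) tuple
def pvMergeRuns (isM : String → Bool) : List (String × Int) → List (String × Int)
  | [] => []
  | (p, c) :: rest =>
    if isM p then (p, c) :: pvMergeRuns isM rest
    else
      (PySem.Str.join "" (((p, c) :: rest.takeWhile (fun pc => !isM pc.1)).map (fun pc => pvStrTimes pc.1 pc.2)), 1)
        :: pvMergeRuns isM (rest.dropWhile (fun pc => !isM pc.1))
termination_by l => l.length
decreasing_by
  · simp
  · have := List.length_dropWhile_le (fun pc => !isM pc.1) rest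
    simp only [List.length_cons]; omega

-- A's inner loop, written as structural recursion: sp is the pending buffer of fragments
def pvMergeAux (isM : String → Bool) (sp : List String) : List (String × Int) → List (String × Int)
  | [] => if sp = [] then [] else [(PySem.Str.join "" sp, 1)]
  | pc :: rest =>
    if !(isM pc.1) then pvMergeAux isM (sp ++ [pvStrTimes pc.1 pc.2]) rest
    else (if sp = [] then [] else [(PySem.Str.join "" sp, 1)]) ++ (pc.1, pc.2) :: pvMergeAux isM [] rest

-- A's foldl + final flush equals pvMergeAux, with the emitted prefix spl factored out
theorem foldA_eq (isM : String → Bool) (l : List (String × Int)) :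
    ∀ (spl : List (String × Int)) (sp : List String),
    (let st := l.foldl (fun (st : List (String × Int) × List String) pc =>
        if !(isM pc.1) then (st.1, st.2 ++ [pvStrTimes pc.1 pc.2])
        else ((if st.2 ≠ [] then st.1 ++ [(PySem.Str.join "" st.2, 1)] else st.1) ++ [(pc.1, pc.2)], []))
      (spl, sp);
     if st.2 ≠ [] then st.1 ++ [(PySem.Str.join "" st.2, 1)] else st.1)
    = spl ++ pvMergeAux isM sp l := by
  induction l with
  | nil =>
    intro spl sp
    by_cases h : sp = [] <;> simp [pvMergeAux, h]
  | cons pc rest ih =>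
    intro spl sp
    by_cases h : isM pc.1
    · have hstep := ih ((if sp ≠ [] then spl ++ [(PySem.Str.join "" sp, 1)] else spl) ++ [(pc.1, pc.2)]) []
      by_cases hsp : sp = [] <;>
        simp only [List.foldl_cons, h, Bool.not_true, Bool.false_eq_true, if_false, hsp,
          ne_eq, not_true_eq_false, not_false_eq_true, if_true, if_false] at hstep ⊢ <;>
        rw [hstep] <;> simp [pvMergeAux, h, hsp]
    · simpa [List.foldl_cons, h, pvMergeAux] using ih spl (sp ++ [pvStrTimes pc.1 pc.2])

-- pvMergeAux with empty buffer is pvMergeRuns; with a non-empty buffer it merges the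
-- buffer into the leading non-motif run.  (Combined statement for the length induction.)
theorem mergeAux_eq (isM : String → Bool) :
    ∀ (n : Nat) (l : List (String × Int)), l.length ≤ n →
    (pvMergeAux isM [] l = pvMergeRuns isM l) ∧
    (∀ sp : List String, sp ≠ [] →
      pvMergeAux isM sp l =
        (PySem.Str.join "" (sp ++ (l.takeWhile (fun pc => !isM pc.1)).map (fun pc => pvStrTimes pc.1 pc.2)), 1)
          :: pvMergeRuns isM (l.dropWhile (fun pc => !isM pc.1))) := by
  intro n
  induction n with
  | zero =>
    intro l hl
    have : l = [] := List.length_eq_zero_iff.mp (Nat.le_zero.mp hl)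
    subst this
    refine ⟨by simp [pvMergeAux, pvMergeRuns], ?_⟩
    intro sp hsp
    simp [pvMergeAux, hsp, pvMergeRuns]
  | succ n ih =>
    intro l hl
    match l with
    | [] =>
      refine ⟨by simp [pvMergeAux, pvMergeRuns], ?_⟩
      intro sp hsp
      simp [pvMergeAux, hsp, pvMergeRuns]
    | (p, c) :: rest =>
      have hrest : rest.length ≤ n := by simpa using Nat.lt_succ_iff.mp (Nat.lt_of_lt_of_le (by simp) hl)
      constructor
      · by_cases h : isM p
        · simp [pvMergeAux, h, pvMergeRuns, (ih rest hrest).1]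
        · have h2 := (ih rest hrest).2 [pvStrTimes p c] (by simp)
          simp [pvMergeAux, h, pvMergeRuns, h2]
      · intro sp hsp
        by_cases h : isM p
        · simp [pvMergeAux, h, hsp, pvMergeRuns, List.takeWhile, List.dropWhile, (ih rest hrest).1]
        · have h2 := (ih rest hrest).2 (sp ++ [pvStrTimes p c]) (by simp)
          simp [pvMergeAux, h, h2, List.takeWhile, List.dropWhile]

-- the two membership tests agree
theorem pred_eq (ml : List (String × Int)) (p : String) :
    (ml.any (fun q => q.1 == p)) = PySem.Set.contains (PySem.Set.ofList (ml.map (·.1))) p := by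
  by_cases h : p ∈ ml.map (·.1)
  · have hL : ml.any (fun q => q.1 == p) = true := by
      obtain ⟨q, hq, hq1⟩ := List.exists_of_mem_map h
      exact List.any_eq_true.mpr ⟨q, hq, by simp [hq1]⟩
    have hR : PySem.Set.contains (PySem.Set.ofList (ml.map (·.1))) p = true := by
      have : p ∈ PySem.Set.ofList (ml.map (·.1)) := (PySem.Set.mem_ofList _ _).mpr h
      simpa [PySem.Set.contains] using this
    rw [hL, hR]
  · have hL : ml.any (fun q => q.1 == p) = false := by
      simp only [List.any_eq_false]
      intro q hq
      simp only [beq_iff_eq]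
      intro hq1
      exact h (List.mem_map.mpr ⟨q, hq, hq1⟩)
    have hR : PySem.Set.contains (PySem.Set.ofList (ml.map (·.1))) p = false := by
      have : p ∉ PySem.Set.ofList (ml.map (·.1)) := fun hc => h ((PySem.Set.mem_ofList _ _).mp hc)
      simpa [PySem.Set.contains] using this
    rw [hL, hR]

-- A's inner processing of one pattern_list is pvMergeRuns
theorem inner_eq (isM : String → Bool) (l : List (String × Int)) :
    (let st := l.foldl (fun (st : List (String × Int) × List String) pc =>
        if !(isM pc.1) then (st.1, st.2 ++ [pvStrTimes pc.1 pc.2])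
        else ((if st.2 ≠ [] then st.1 ++ [(PySem.Str.join "" st.2, 1)] else st.1) ++ [(pc.1, pc.2)], []))
      ([], []);
     if st.2 ≠ [] then st.1 ++ [(PySem.Str.join "" st.2, 1)] else st.1)
    = pvMergeRuns isM l := by
  rw [foldA_eq isM l [] []]
  simpa using (mergeAux_eq isM l.length l le_rfl).1

-- ===== the B side: boundary indices and the slicing fold =====

-- the motif indices of l, starting at offset s (the Nat shadow of B's 'cuts')
def pvIdxs (isM : String → Bool) : List (String × Int) → Nat → List Nat
  | [], _ => []
  | pc :: rest, s => (if isM pc.1 then [s] else []) ++ pvIdxs isM rest (s + 1)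

theorem cuts_eq (isM : String → Bool) :
    ∀ (l : List (String × Int)) (s : Nat),
    ((PySem.List.enumerate l (s : Int)).filter (fun ip => isM ip.2.1)).map (·.1)
      = (pvIdxs isM l s).map (fun (n : Nat) => (n : Int)) := by
  intro l
  induction l with
  | nil => intro s; simp [PySem.List.enumerate_nil, pvIdxs]
  | cons pc rest ih =>
    intro s
    rw [PySem.List.enumerate_cons]
    rw [show ((s : Int) + 1) = ((s + 1 : Nat) : Int) by push_cast; ring]
    by_cases h : isM pc.1
    · rw [List.filter_cons_of_pos (by simpa using h), List.map_cons, ih (s + 1)]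
      have he : pvIdxs isM (pc :: rest) s = s :: pvIdxs isM rest (s + 1) := by simp [pvIdxs, h]
      rw [he, List.map_cons]
    · rw [List.filter_cons_of_neg (by simpa using h), ih (s + 1)]
      have he : pvIdxs isM (pc :: rest) s = pvIdxs isM rest (s + 1) := by simp [pvIdxs, h]
      rw [he]

theorem mem_pvIdxs (isM : String → Bool) :
    ∀ (l : List (String × Int)) (s j : Nat),
    j ∈ pvIdxs isM l s ↔ s ≤ j ∧ ∃ pc, l[j - s]? = some pc ∧ isM pc.1 = true := by
  intro l
  induction l with
  | nil => intro s j; simp [pvIdxs]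
  | cons pc rest ih =>
    intro s j
    by_cases h : isM pc.1
    · have he : pvIdxs isM (pc :: rest) s = s :: pvIdxs isM rest (s + 1) := by simp [pvIdxs, h]
      rw [he, List.mem_cons]
      constructor
      · rintro (rfl | hj)
        · exact ⟨le_rfl, pc, by simp, h⟩
        · obtain ⟨hs, pc', hget, hm⟩ := (ih (s + 1) j).mp hj
          refine ⟨by omega, pc', ?_, hm⟩
          have hd : j - s = (j - (s + 1)) + 1 := by omega
          rw [hd]
          simpa using hget
      · rintro ⟨hs, pc', hget, hm⟩
        by_cases hjs : j = s
        · exact Or.inl hjs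
        · refine Or.inr ((ih (s + 1) j).mpr ⟨by omega, pc', ?_, hm⟩)
          have hd : j - s = (j - (s + 1)) + 1 := by omega
          rw [hd] at hget
          simpa using hget
    · have he : pvIdxs isM (pc :: rest) s = pvIdxs isM rest (s + 1) := by simp [pvIdxs, h]
      rw [he, ih (s + 1) j]
      constructor
      · rintro ⟨hs, pc', hget, hm⟩
        refine ⟨by omega, pc', ?_, hm⟩
        have hd : j - s = (j - (s + 1)) + 1 := by omega
        rw [hd]
        simpa using hget
      · rintro ⟨hs, pc', hget, hm⟩
        by_cases hjs : j = s
        · subst hjs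
          simp at hget
          rw [hget] at h
          exact absurd hm h
        · refine ⟨by omega, pc', ?_, hm⟩
          have hd : j - s = (j - (s + 1)) + 1 := by omega
          rw [hd] at hget
          simpa using hget

theorem pairwise_pvIdxs (isM : String → Bool) :
    ∀ (l : List (String × Int)) (s : Nat), (pvIdxs isM l s).Pairwise (· < ·) := by
  intro l
  induction l with
  | nil => intro s; simp [pvIdxs]
  | cons pc rest ih =>
    intro s
    have hge : ∀ j ∈ pvIdxs isM rest (s + 1), s < j := by
      intro j hj
      have := ((mem_pvIdxs isM rest (s + 1) j).mp hj).1
      omega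
    by_cases h : isM pc.1
    · have he : pvIdxs isM (pc :: rest) s = s :: pvIdxs isM rest (s + 1) := by simp [pvIdxs, h]
      rw [he, List.pairwise_cons]
      exact ⟨hge, ih (s + 1)⟩
    · have he : pvIdxs isM (pc :: rest) s = pvIdxs isM rest (s + 1) := by simp [pvIdxs, h]
      rw [he]
      exact ih (s + 1)

-- takeWhile/dropWhile across a non-motif block followed by a motif element
theorem tw_dw {α : Type} (p : α → Bool) :
    ∀ (A : List α) (x : α) (tl : List α), (∀ a ∈ A, p a = true) → p x = false →
    (A ++ x :: tl).takeWhile p = A ∧ (A ++ x :: tl).dropWhile p = x :: tl := by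
  intro A
  induction A with
  | nil => intro x tl _ hx; simp [hx]
  | cons a A ih =>
    intro x tl hA hx
    have ha : p a = true := hA a (by simp)
    have := ih x tl (fun b hb => hA b (by simp [hb])) hx
    simp [ha, this.1, this.2]

-- pvMergeRuns of an all-non-motif non-empty list is one joined tuple
theorem mergeRuns_nonmotif (isM : String → Bool) (l : List (String × Int))
    (h : ∀ pc ∈ l, isM pc.1 = false) :
    pvMergeRuns isM l =
      if l = [] then [] else [(PySem.Str.join "" (l.map (fun pc => pvStrTimes pc.1 pc.2)), 1)] := by
  match l with
  | [] => simp [pvMergeRuns]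
  | (p, c) :: rest =>
    have hp : isM p = false := h (p, c) (by simp)
    have htw : rest.takeWhile (fun pc => !isM pc.1) = rest := by
      rw [List.takeWhile_eq_self_iff]
      intro x hx
      simp [h x (by simp [hx])]
    have hdw : rest.dropWhile (fun pc => !isM pc.1) = [] := by
      rw [List.dropWhile_eq_nil_iff]
      intro x hx
      simp [h x (by simp [hx])]
    simp [pvMergeRuns, hp, htw, hdw]

-- pvMergeRuns across a non-motif block, a motif element, and the rest
theorem mergeRuns_run (isM : String → Bool) (A : List (String × Int)) (pc : String × Int)
    (tl : List (String × Int)) (hA : ∀ q ∈ A, isM q.1 = false) (hpc : isM pc.1 = true) :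
    pvMergeRuns isM (A ++ pc :: tl) =
      (if A = [] then [] else [(PySem.Str.join "" (A.map (fun q => pvStrTimes q.1 q.2)), 1)])
        ++ pc :: pvMergeRuns isM tl := by
  obtain ⟨p, c⟩ := pc
  have hpc' : isM p = true := hpc
  match A with
  | [] => simp [pvMergeRuns, hpc']
  | (q1, q2) :: A' =>
    have hq : isM q1 = false := hA (q1, q2) (by simp)
    have h1 := tw_dw (fun pc => !isM pc.1) A' (p, c) tl
      (fun b hb => by simp [hA b (by simp [hb])]) (by simp [hpc'])
    simp only [List.cons_append, pvMergeRuns, hq, Bool.false_eq_true, if_false, h1.1, h1.2]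
    simp [hpc']

-- B's slicing fold over a valid cut list produces pvMergeRuns of the suffix
theorem foldB_eq (isM : String → Bool) (pl : List (String × Int)) :
    ∀ (cs : List Nat) (k : Nat) (out : List (String × Int)),
    cs.Pairwise (· < ·) →
    (∀ j ∈ cs, k ≤ j) →
    (∀ j ∈ cs, ∃ pc, pl[j]? = some pc ∧ isM pc.1 = true) →
    (∀ j pc, k ≤ j → pl[j]? = some pc → isM pc.1 = true → j ∈ cs) →
    k ≤ pl.length →
    (let st := (cs.map (fun (n : Nat) => (n : Int))).foldl
        (fun (st : List (String × Int) × Int) i =>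
          ((if st.2 < i then
              st.1 ++ [(PySem.Str.join "" ((PySem.List.slice pl (some st.2) (some i)).map (fun pc => pvStrTimes pc.1 pc.2)), 1)]
            else st.1)
            ++ [(PySem.List.pyGet? pl i).getD ("", 0)], i + 1))
        (out, (k : Int));
      if st.2 < (pl.length : Int) then
        st.1 ++ [(PySem.Str.join "" ((PySem.List.slice pl (some st.2) none).map (fun pc => pvStrTimes pc.1 pc.2)), 1)]
      else st.1)
    = out ++ pvMergeRuns isM (pl.drop k) := by
  intro cs
  induction cs with
  | nil =>
    intro k out _ _ _ hcomp hk
    simp only [List.map_nil, List.foldl_nil]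
    have hall : ∀ pc ∈ pl.drop k, isM pc.1 = false := by
      intro pc hpc
      obtain ⟨m, hm, hget⟩ := List.getElem_of_mem hpc
      have h1 : (pl.drop k)[m]? = some pc := by
        rw [List.getElem?_eq_getElem hm]
        exact congrArg some hget
      rw [List.getElem?_drop] at h1
      by_cases hb : isM pc.1
      · exact absurd (hcomp (k + m) pc (by omega) h1 hb) (by simp)
      · simpa using hb
    by_cases hlt : k < pl.length
    · have hne : pl.drop k ≠ [] := by
        intro hcon
        have hlen := congrArg List.length hcon
        simp at hlen
        omega
      rw [if_pos (by exact_mod_cast hlt : ((k : Int) < (pl.length : Int)))]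
      rw [PySem.List.slice_from_natCast,
        mergeRuns_nonmotif isM (pl.drop k) hall, if_neg hne]
    · have hk' : k = pl.length := by omega
      rw [if_neg (by exact_mod_cast hlt : ¬ ((k : Int) < (pl.length : Int))), hk',
        List.drop_length, pvMergeRuns]
      simp
  | cons n cs' ih =>
    intro k out hpw hlb hmot hcomp hk
    obtain ⟨pc0, hpc0, hm0⟩ := hmot n (by simp)
    have hnlen : n < pl.length := (List.getElem?_eq_some_iff.mp hpc0).1
    have hkn : k ≤ n := hlb n (by simp)
    simp only [List.map_cons, List.foldl_cons]
    rw [show ((n : Int) + 1) = ((n + 1 : Nat) : Int) by push_cast; ring]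
    have hstep : ((if (k : Int) < (n : Int) then
          out ++ [(PySem.Str.join "" ((PySem.List.slice pl (some (k : Int)) (some (n : Int))).map (fun pc => pvStrTimes pc.1 pc.2)), 1)]
        else out) ++ [(PySem.List.pyGet? pl (n : Int)).getD ("", 0)])
        = (if k < n then
            out ++ [(PySem.Str.join "" (((pl.drop k).take (n - k)).map (fun pc => pvStrTimes pc.1 pc.2)), 1)]
          else out) ++ [pc0] := by
      rw [PySem.List.slice_natCast, PySem.List.pyGet?_natCast, hpc0]
      congr 1
      by_cases h : k < n
      · rw [if_pos (by exact_mod_cast h), if_pos h]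
      · rw [if_neg (by exact_mod_cast h), if_neg h]
    rw [hstep]
    rw [ih (n + 1) _ (List.Pairwise.of_cons hpw)
      (fun j hj => by have := (List.pairwise_cons.mp hpw).1 j hj; omega)
      (fun j hj => hmot j (by simp [hj]))
      (fun j pc hj hget hb => by
        have := hcomp j pc (by omega) hget hb
        simp at this
        rcases this with h | h
        · omega
        · exact h)
      (by omega)]
    -- now identify pvMergeRuns (pl.drop k)
    have hA : ∀ q ∈ (pl.drop k).take (n - k), isM q.1 = false := by
      intro q hq
      obtain ⟨m, hm, hget⟩ := List.getElem_of_mem hq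
      have hmlt : m < n - k := lt_of_lt_of_le hm (by simp)
      have hget? : pl[k + m]? = some q := by
        have h1 : ((pl.drop k).take (n - k))[m]? = some q := by
          rw [List.getElem?_eq_getElem hm]
          exact congrArg some hget
        rw [List.getElem?_take, if_pos hmlt, List.getElem?_drop] at h1
        exact h1
      by_cases hb : isM q.1
      · have := hcomp (k + m) q (by omega) hget? hb
        simp at this
        rcases this with h | h
        · omega
        · have := (List.pairwise_cons.mp hpw).1 (k + m) h
          omega
      · simpa using hb
    have hsplit : pl.drop k = (pl.drop k).take (n - k) ++ pc0 :: pl.drop (n + 1) := by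
      have h1 : pl.drop k = (pl.drop k).take (n - k) ++ (pl.drop k).drop (n - k) := by
        rw [List.take_append_drop]
      have h2 : (pl.drop k).drop (n - k) = pl.drop n := by
        rw [List.drop_drop]
        congr 1
        omega
      have h3 : pl.drop n = pl[n] :: pl.drop (n + 1) := List.drop_eq_getElem_cons hnlen
      have h4 : pl[n] = pc0 := by
        have := List.getElem?_eq_getElem hnlen
        rw [hpc0] at this
        exact (Option.some.injEq _ _ ▸ this.symm :)
      conv_lhs => rw [h1]
      rw [h2, h3, h4]
    have hM : pvMergeRuns isM (pl.drop k)
        = (if (pl.drop k).take (n - k) = [] then []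
            else [(PySem.Str.join "" (((pl.drop k).take (n - k)).map (fun q => pvStrTimes q.1 q.2)), 1)])
          ++ pc0 :: pvMergeRuns isM (pl.drop (n + 1)) := by
      conv_lhs => rw [hsplit]
      exact mergeRuns_run isM _ pc0 _ hA hm0
    rw [hM]
    have hAe : ((pl.drop k).take (n - k) = []) ↔ ¬ k < n := by
      constructor
      · intro h
        have := congrArg List.length h
        simp at this
        omega
      · intro h
        have : n - k = 0 := by omega
        simp [this]
    by_cases h : k < n
    · rw [if_pos h, if_neg (by rw [hAe]; simp [h])]
      simp only [List.append_assoc, List.cons_append, List.nil_append]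
    · rw [if_neg h, if_pos (hAe.mpr h)]
      simp only [List.append_assoc, List.cons_append, List.nil_append]

-- B's inner processing of one pattern_list is pvMergeRuns
theorem innerB_eq (isM : String → Bool) (pl : List (String × Int)) :
    (let cuts := ((PySem.List.enumerate pl 0).filter (fun ip => isM ip.2.1)).map (·.1)
     let st := cuts.foldl (fun (st : List (String × Int) × Int) i =>
        ((if st.2 < i then
            st.1 ++ [(PySem.Str.join "" ((PySem.List.slice pl (some st.2) (some i)).map (fun pc => pvStrTimes pc.1 pc.2)), 1)]
          else st.1)
          ++ [(PySem.List.pyGet? pl i).getD ("", 0)], i + 1))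
        (([], 0) : List (String × Int) × Int)
     if st.2 < (pl.length : Int) then
        st.1 ++ [(PySem.Str.join "" ((PySem.List.slice pl (some st.2) none).map (fun pc => pvStrTimes pc.1 pc.2)), 1)]
     else st.1)
    = pvMergeRuns isM pl := by
  have hcuts : ((PySem.List.enumerate pl 0).filter (fun ip => isM ip.2.1)).map (·.1)
      = (pvIdxs isM pl 0).map (fun (n : Nat) => (n : Int)) := by
    have := cuts_eq isM pl 0
    simpa using this
  dsimp only
  rw [hcuts]
  have := foldB_eq isM pl (pvIdxs isM pl 0) 0 []
    (pairwise_pvIdxs isM pl 0)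
    (fun j _ => Nat.zero_le j)
    (fun j hj => by
      obtain ⟨_, pc, hget, hm⟩ := (mem_pvIdxs isM pl 0 j).mp hj
      exact ⟨pc, by simpa using hget, hm⟩)
    (fun j pc _ hget hm => (mem_pvIdxs isM pl 0 j).mpr ⟨Nat.zero_le j, pc, by simpa using hget, hm⟩)
    (Nat.zero_le _)
  simpa using this

-- ===== VERDICT (by name: the statement is the Claim_ definition above) =====
theorem simplify_pattern_dict_spec : Claim_equal_simplify_pattern_dict := by
  intro pattern_dict motif_dict _hdom
  unfold Spec_simplify_pattern_dict simplify_pattern_dict simplify_pattern_dict_alt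
  dsimp only
  congr 1
  rw [PySem.Dict.items_eq_map_keys (PySem.Dict.ofList pattern_dict)
        (PySem.Dict.nodup_keys_ofList pattern_dict) ([] : List (List (String × Int))),
      List.foldl_map]
  have hfun :
      (fun (acc : PySem.Dict String (List (List (String × Int)))) (gene : String) =>
        ((PySem.Dict.ofList pattern_dict).getD gene []).foldl (fun acc pattern_list =>
          let st := pattern_list.foldl (fun (st : List (String × Int) × List String) pc =>
            if !(((PySem.Dict.ofList motif_dict).getD gene []).any (fun q => q.1 == pc.1)) then
              (st.1, st.2 ++ [pvStrTimes pc.1 pc.2])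
            else
              ((if st.2 ≠ [] then st.1 ++ [(PySem.Str.join "" st.2, 1)] else st.1) ++ [(pc.1, pc.2)], []))
            (([], []) : List (String × Int) × List String)
          let spl := if st.2 ≠ [] then st.1 ++ [(PySem.Str.join "" st.2, 1)] else st.1
          acc.modify gene [] (· ++ [spl])) acc)
      = (fun (acc : PySem.Dict String (List (List (String × Int)))) (gene : String) =>
        ((PySem.Dict.ofList pattern_dict).getD gene []).foldl (fun acc pl =>
          let cuts := ((PySem.List.enumerate pl 0).filter (fun ip =>
            PySem.Set.contains (PySem.Set.ofList (((PySem.Dict.ofList motif_dict).getD gene []).map (·.1))) ip.2.1)).map (·.1)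
          let st := cuts.foldl (fun (st : List (String × Int) × Int) i =>
            ((if st.2 < i then
                st.1 ++ [(PySem.Str.join "" ((PySem.List.slice pl (some st.2) (some i)).map (fun pc => pvStrTimes pc.1 pc.2)), 1)]
              else st.1)
              ++ [(PySem.List.pyGet? pl i).getD ("", 0)], i + 1))
            (([], 0) : List (String × Int) × Int)
          let out := if st.2 < (pl.length : Int) then
              st.1 ++ [(PySem.Str.join "" ((PySem.List.slice pl (some st.2) none).map (fun pc => pvStrTimes pc.1 pc.2)), 1)]
            else st.1
          acc.modify gene [] (· ++ [out])) acc) := by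
    funext acc gene
    set isM : String → Bool := fun p =>
      PySem.Set.contains (PySem.Set.ofList (((PySem.Dict.ofList motif_dict).getD gene []).map (·.1))) p with hisM
    have hstep :
        (fun (acc : PySem.Dict String (List (List (String × Int)))) (pattern_list : List (String × Int)) =>
          let st := pattern_list.foldl (fun (st : List (String × Int) × List String) pc =>
            if !(((PySem.Dict.ofList motif_dict).getD gene []).any (fun q => q.1 == pc.1)) then
              (st.1, st.2 ++ [pvStrTimes pc.1 pc.2])
            else
              ((if st.2 ≠ [] then st.1 ++ [(PySem.Str.join "" st.2, 1)] else st.1) ++ [(pc.1, pc.2)], []))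
            (([], []) : List (String × Int) × List String)
          let spl := if st.2 ≠ [] then st.1 ++ [(PySem.Str.join "" st.2, 1)] else st.1
          acc.modify gene [] (· ++ [spl]))
        = (fun (acc : PySem.Dict String (List (List (String × Int)))) (pl : List (String × Int)) =>
          let cuts := ((PySem.List.enumerate pl 0).filter (fun ip => isM ip.2.1)).map (·.1)
          let st := cuts.foldl (fun (st : List (String × Int) × Int) i =>
            ((if st.2 < i then
                st.1 ++ [(PySem.Str.join "" ((PySem.List.slice pl (some st.2) (some i)).map (fun pc => pvStrTimes pc.1 pc.2)), 1)]
              else st.1)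
              ++ [(PySem.List.pyGet? pl i).getD ("", 0)], i + 1))
            (([], 0) : List (String × Int) × Int)
          let out := if st.2 < (pl.length : Int) then
              st.1 ++ [(PySem.Str.join "" ((PySem.List.slice pl (some st.2) none).map (fun pc => pvStrTimes pc.1 pc.2)), 1)]
            else st.1
          acc.modify gene [] (· ++ [out])) := by
      funext acc' pl
      dsimp only
      have hA : (let st := pl.foldl (fun (st : List (String × Int) × List String) pc =>
                      if !(((PySem.Dict.ofList motif_dict).getD gene []).any (fun q => q.1 == pc.1)) then
                        (st.1, st.2 ++ [pvStrTimes pc.1 pc.2])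
                      else
                        ((if st.2 ≠ [] then st.1 ++ [(PySem.Str.join "" st.2, 1)] else st.1) ++ [(pc.1, pc.2)], []))
                      (([], []) : List (String × Int) × List String)
                 if st.2 ≠ [] then st.1 ++ [(PySem.Str.join "" st.2, 1)] else st.1) = pvMergeRuns isM pl := by
        have h1 := inner_eq (fun p => ((PySem.Dict.ofList motif_dict).getD gene []).any (fun q => q.1 == p)) pl
        have hp : (fun p => ((PySem.Dict.ofList motif_dict).getD gene []).any (fun q => q.1 == p)) = isM := by
          funext p
          rw [hisM]
          exact pred_eq _ p
        rw [hp] at h1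
        exact h1
      rw [hA, innerB_eq isM pl]
    rw [hstep]
  rw [hfun]
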